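-- pv_equiv track=rewrite | github.com/rzissoldt/Hierarchical-Multi-Label-Classification | utils/dataset_analyzer.py | _calc_total_class_labels
-- ===== SOURCE A (Python) =====
-- def _calc_total_class_labels(label_dict,hierarchy_dicts):
--     level = 0
--     total_class_labels = []
--     for key,value in label_dict.items():
--         for label in label_dict[key]:
--             if level == 0:
--                 total_class_labels.append(label)
--             else:
--                 total_class_label = label
--                 for i in range(level):
--                     total_class_label+=len(hierarchy_dicts[i].keys())
--                 total_class_labels.append(total_class_label)
--         level+=1
--     return total_class_labels
-- ===== SOURCE B (Python) =====
-- def _calc_total_class_labels(label_dict, hierarchy_dicts):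
--     # prefix sums of hierarchy level sizes: offsets[level] = sum(len(h) for h in hierarchy_dicts[:level])
--     offsets = []
--     acc = 0
--     for hd in hierarchy_dicts:
--         offsets.append(acc)
--         acc += len(hd)
--     offsets.append(acc)
--     return [label + offsets[level]
--             for level, labels in enumerate(label_dict.values())
--             for label in labels]
-- ===== Notes on version B (the rewrite author's own statement) =====
-- stated objective: alternative
-- what changed: B precomputes a prefix-sum table of the hierarchy level sizes once and does a single table lookup per label, instead of A's per-label inner loop re-summing all previous level sizes.
import Mathlib
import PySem

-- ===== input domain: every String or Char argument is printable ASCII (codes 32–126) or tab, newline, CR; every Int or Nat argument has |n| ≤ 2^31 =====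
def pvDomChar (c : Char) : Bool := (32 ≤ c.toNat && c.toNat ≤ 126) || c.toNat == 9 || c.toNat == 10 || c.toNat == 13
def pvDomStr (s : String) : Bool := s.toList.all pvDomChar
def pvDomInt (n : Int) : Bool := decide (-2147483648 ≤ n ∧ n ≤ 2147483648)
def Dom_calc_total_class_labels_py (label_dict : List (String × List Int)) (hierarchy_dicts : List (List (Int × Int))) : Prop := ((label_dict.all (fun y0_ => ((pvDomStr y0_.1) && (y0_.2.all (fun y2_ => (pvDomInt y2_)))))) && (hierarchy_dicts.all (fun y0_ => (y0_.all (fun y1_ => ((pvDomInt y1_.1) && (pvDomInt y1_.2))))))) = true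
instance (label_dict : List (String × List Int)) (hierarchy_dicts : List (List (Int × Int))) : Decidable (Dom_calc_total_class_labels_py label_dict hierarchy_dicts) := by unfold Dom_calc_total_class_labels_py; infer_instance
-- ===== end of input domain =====

-- B replaces A's per-label inner summation loop by a once-computed prefix-sum table of hierarchy level sizes (alternative decomposition, same result).


-- ===== PORT A =====
def calc_total_class_labels_py (label_dict : List (String × List Int)) (hierarchy_dicts : List (List (Int × Int))) : List Int :=
  (label_dict.foldl
    (fun (st : Int × List Int) kv =>
      (st.1 + 1,
       ((PySem.Dict.mk label_dict).getD kv.1 []).foldl   -- 'for label in label_dict[key]'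
        (fun acc label =>
          if st.1 = 0 then acc ++ [label]
          else acc ++ [(PySem.List.pyRange 0 st.1 1).foldl
              (fun t i => t + ((((PySem.List.pyGet? hierarchy_dicts i).getD []).length : Nat) : Int)) label])
        st.2))
    ((0 : Int), ([] : List Int))).2

-- ===== PORT B =====
-- helper for B: offsets[j] = sum of lengths of hierarchy_dicts[:j], for j = 0 .. len(hierarchy_dicts)
def pyOffsets (hierarchy_dicts : List (List (Int × Int))) : List Int :=
  let p := hierarchy_dicts.foldl
    (fun (p : List Int × Int) hd => (p.1 ++ [p.2], p.2 + (hd.length : Int)))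
    (([] : List Int), (0 : Int))
  p.1 ++ [p.2]

def calc_total_class_labels_py_alt (label_dict : List (String × List Int)) (hierarchy_dicts : List (List (Int × Int))) : List Int :=
  let offsets := pyOffsets hierarchy_dicts
  (PySem.List.enumerate ((PySem.Dict.mk label_dict).values) 0).flatMap
    (fun q => q.2.map (fun label => label + (PySem.List.pyGet? offsets q.1).getD 0))

-- ===== PRECONDITION & SPEC =====
-- Pre_ excludes (a) duplicate keys in label_dict, which a real Python dict cannot carry (the assoc list is its Lean image,
-- so such lists are representation artefacts), and (b) inputs where some level j with a nonempty label list has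
-- j > len(hierarchy_dicts), on which A raises IndexError.
def Pre_calc_total_class_labels_py (label_dict : List (String × List Int)) (hierarchy_dicts : List (List (Int × Int))) : Prop :=
  (label_dict.map Prod.fst).Nodup ∧
  ∀ j, j < label_dict.length → (label_dict.getD j ("", [])).2 ≠ [] → j ≤ hierarchy_dicts.length
instance (label_dict : List (String × List Int)) (hierarchy_dicts : List (List (Int × Int))) : Decidable (Pre_calc_total_class_labels_py label_dict hierarchy_dicts) := by unfold Pre_calc_total_class_labels_py; infer_instance

def pvWitness_calc_total_class_labels_py : (List (String × List Int)) × (List (List (Int × Int))) :=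
  ([("a", [0, 1]), ("b", [0])], [[(0, 0), (1, 1)]])

def Spec_calc_total_class_labels_py (label_dict : List (String × List Int)) (hierarchy_dicts : List (List (Int × Int))) (out : List Int) : Prop := out = calc_total_class_labels_py_alt label_dict hierarchy_dicts
instance (label_dict : List (String × List Int)) (hierarchy_dicts : List (List (Int × Int))) (out : List Int) : Decidable (Spec_calc_total_class_labels_py label_dict hierarchy_dicts out) := by unfold Spec_calc_total_class_labels_py; infer_instance

-- ===== CLAIM (what is proved, stated in full; the proofs are below) =====
def Claim_equal_calc_total_class_labels_py : Prop := ∀ (label_dict : List (String × List Int)) (hierarchy_dicts : List (List (Int × Int))), Dom_calc_total_class_labels_py label_dict hierarchy_dicts → Pre_calc_total_class_labels_py label_dict hierarchy_dicts → Spec_calc_total_class_labels_py label_dict hierarchy_dicts (calc_total_class_labels_py label_dict hierarchy_dicts)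

-- ===== LEMMAS AND PROOFS =====

-- prefix sum of the first m hierarchy level sizes
def pvPrefix (hierarchy_dicts : List (List (Int × Int))) (m : Nat) : Int :=
  ((List.range m).map (fun i => ((hierarchy_dicts.getD i []).length : Int))).sum

theorem prefix_cons (d : List (Int × Int)) (t : List (List (Int × Int))) (j : Nat) :
    pvPrefix (d :: t) (j + 1) = (d.length : Int) + pvPrefix t j := by
  simp [pvPrefix, List.range_succ_eq_map, List.map_map, Function.comp_def]

theorem offsets_fold (t : List (List (Int × Int))) : ∀ (acc : List Int) (c : Int),
    t.foldl (fun (p : List Int × Int) hd => (p.1 ++ [p.2], p.2 + (hd.length : Int))) (acc, c)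
    = (acc ++ (List.range t.length).map (fun j => c + pvPrefix t j), c + pvPrefix t t.length) := by
  induction t with
  | nil => intro acc c; simp [pvPrefix]
  | cons d t ih =>
    intro acc c
    simp only [List.foldl_cons, ih, List.length_cons, List.range_succ_eq_map, List.map_cons,
      List.map_map, Function.comp_def, prefix_cons]
    have h0 : pvPrefix (d :: t) 0 = 0 := by simp [pvPrefix]
    simp [h0, List.append_assoc, add_assoc]

theorem pyGet?_pyOffsets (hierarchy_dicts : List (List (Int × Int))) (m : Nat)
    (h : m ≤ hierarchy_dicts.length) :
    PySem.List.pyGet? (pyOffsets hierarchy_dicts) (m : Int) = some (pvPrefix hierarchy_dicts m) := by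
  have hc : pyOffsets hierarchy_dicts
      = (List.range (hierarchy_dicts.length + 1)).map (pvPrefix hierarchy_dicts) := by
    simp [pyOffsets, offsets_fold, List.range_succ, List.map_append]
  rw [hc, PySem.List.pyGet?_natCast]
  simp [Nat.lt_succ_of_le h]

theorem rangeSum_eq_prefix (hierarchy_dicts : List (List (Int × Int))) (m : Nat) (label : Int) :
    (PySem.List.pyRange 0 (m : Int) 1).foldl
      (fun t i => t + ((((PySem.List.pyGet? hierarchy_dicts i).getD []).length : Nat) : Int)) label
    = label + pvPrefix hierarchy_dicts m := by
  rw [PySem.List.pyRange_zero_natCast, PySem.List.foldl_add]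
  simp [pvPrefix, List.map_map, Function.comp_def, PySem.List.pyGet?_natCast]

theorem inner_fold (hierarchy_dicts : List (List (Int × Int))) (m : Nat) (labels acc : List Int) :
    labels.foldl
      (fun acc label =>
        if ((m : Int)) = 0 then acc ++ [label]
        else acc ++ [(PySem.List.pyRange 0 (m : Int) 1).foldl
            (fun t i => t + ((((PySem.List.pyGet? hierarchy_dicts i).getD []).length : Nat) : Int)) label])
      acc
    = acc ++ labels.map (fun label => label + pvPrefix hierarchy_dicts m) := by
  rcases Nat.eq_zero_or_pos m with hm | hm
  · subst hm
    simp only [Nat.cast_zero, if_true]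
    rw [PySem.List.foldl_append_singleton_eq_self]
    simp [pvPrefix]
  · have hne : ((m : Int)) ≠ 0 := by
      have : m ≠ 0 := by omega
      exact_mod_cast this
    simp only [if_neg hne]
    rw [PySem.List.foldl_append_singleton_eq_map]
    simp [rangeSum_eq_prefix]

theorem main_fold (hierarchy_dicts : List (List (Int × Int)))
    (ld : List (String × List Int)) : ∀ (m : Nat) (acc : List Int),
    (∀ j, j < ld.length → (ld.getD j ("", [])).2 ≠ [] → m + j ≤ hierarchy_dicts.length) →
    (ld.foldl
      (fun (st : Int × List Int) kv =>
        (st.1 + 1,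
         kv.2.foldl
          (fun acc label =>
            if st.1 = 0 then acc ++ [label]
            else acc ++ [(PySem.List.pyRange 0 st.1 1).foldl
                (fun t i => t + ((((PySem.List.pyGet? hierarchy_dicts i).getD []).length : Nat) : Int)) label])
          st.2))
      ((m : Int), acc)).2
    = acc ++ (PySem.List.enumerate (ld.map Prod.snd) (m : Int)).flatMap
        (fun q => q.2.map (fun label => label + (PySem.List.pyGet? (pyOffsets hierarchy_dicts) q.1).getD 0)) := by
  induction ld with
  | nil => intro m acc _; simp [PySem.List.enumerate_nil]
  | cons kv t ih =>
    intro m acc hpre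
    rw [List.foldl_cons]
    have hstep : ((m : Int) + 1) = (((m + 1 : Nat)) : Int) := by push_cast; ring
    have hinner := inner_fold hierarchy_dicts m kv.2 acc
    simp only [hinner, hstep]
    rw [ih (m + 1) _ (fun j hj hne => by
      have := hpre (j + 1) (by simpa using Nat.succ_lt_succ hj) (by simpa using hne)
      omega)]
    rw [List.map_cons, PySem.List.enumerate_cons, List.flatMap_cons, ← List.append_assoc]
    congr 2
    by_cases h2 : kv.2 = []
    · simp [h2]
    · have hm : m ≤ hierarchy_dicts.length := by
        have := hpre 0 (by simp) (by simpa using h2)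
        omega
      simp [pyGet?_pyOffsets _ _ hm]

-- ===== VERDICT (by name: the statement is the Claim_ definition above) =====
theorem calc_total_class_labels_py_spec : Claim_equal_calc_total_class_labels_py := by
  intro ld hd _ hpre
  unfold Spec_calc_total_class_labels_py calc_total_class_labels_py calc_total_class_labels_py_alt
  have hnd : (PySem.Dict.mk ld).keys.Nodup := by
    simpa [PySem.Dict.keys] using hpre.1
  have hlook : ∀ (st : Int × List Int) kv, kv ∈ ld →
      (PySem.Dict.mk ld).getD kv.1 [] = kv.2 := by
    intro _ kv hkv
    exact PySem.Dict.getD_of_mem_items (PySem.Dict.mk ld) (by simpa using hkv) hnd []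
  rw [PySem.List.foldl_congr_mem ld
    (fun (st : Int × List Int) kv =>
      (st.1 + 1,
       ((PySem.Dict.mk ld).getD kv.1 []).foldl
        (fun acc label =>
          if st.1 = 0 then acc ++ [label]
          else acc ++ [(PySem.List.pyRange 0 st.1 1).foldl
              (fun t i => t + ((((PySem.List.pyGet? hd i).getD []).length : Nat) : Int)) label])
        st.2))
    (fun (st : Int × List Int) kv =>
      (st.1 + 1,
       kv.2.foldl
        (fun acc label =>
          if st.1 = 0 then acc ++ [label]
          else acc ++ [(PySem.List.pyRange 0 st.1 1).foldl
              (fun t i => t + ((((PySem.List.pyGet? hd i).getD []).length : Nat) : Int)) label])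
        st.2))
    ((0 : Int), ([] : List Int))
    (fun acc kv hkv => by simp only [hlook acc kv hkv])]
  have hmain := main_fold hd ld 0 [] (fun j hj hne => by simpa using hpre.2 j hj hne)
  simp only [Nat.cast_zero] at hmain
  rw [hmain]
  simp [PySem.Dict.values]
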